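-- pv_equiv track=rewrite | github.com/hghalebi/marianneai | services/open-data-service/app/services/code_interpreter_analytics.py | _categorical_columns
-- ===== SOURCE A (Python) =====
-- from typing import Any
--
-- def _categorical_columns(
--
--     rows: list[dict[str, Any]],
--     columns: list[str],
--     numeric_columns: list[str],
--     date_columns: list[str],
-- ) -> list[str]:
--     categorical_columns: list[str] = []
--     ignored = set(numeric_columns) | set(date_columns)
--     for column in columns:
--         if column in ignored:
--             continue
--         if any(token in column.lower() for token in ["id_", "id ", "url", "email", "telephone", "contact"]):
--             continue
--         values = [str(row.get(column)).strip() for row in rows if row.get(column) not in (None, "")]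
--         distinct = {value for value in values if value}
--         if 1 < len(distinct) <= min(20, max(3, len(rows))):
--             categorical_columns.append(column)
--     return categorical_columns[:6]
-- ===== SOURCE B (Python) =====
-- def _categorical_columns(rows, columns, numeric_columns, date_columns):
--     # One global pass over every (column, value) item of every row: dedupe
--     # (column, cleaned value) pairs in a single seen-set and keep an integer
--     # counter of distinct values per column, then an early-exit selection loop.
--     seen = set()
--     counts = {}
--     for row in rows:
--         for col, val in row.items():
--             if val in (None, ""):
--                 continue
--             s = str(val).strip()
--             if not s:
--                 continue
--             if (col, s) not in seen:
--                 seen.add((col, s))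
--                 counts[col] = counts.get(col, 0) + 1
--     ignored = set(numeric_columns) | set(date_columns)
--     limit = min(20, max(3, len(rows)))
--     out = []
--     for column in columns:
--         if len(out) == 6:
--             break
--         if column in ignored:
--             continue
--         if any(t in column.lower() for t in ("id_", "id ", "url", "email", "telephone", "contact")):
--             continue
--         if 1 < counts.get(column, 0) <= limit:
--             out.append(column)
--     return out
-- ===== Notes on version B (the rewrite author's own statement) =====
-- stated objective: alternative
-- what changed: A scans all rows once per candidate column, building a distinct-value set per column inside the column loop; B makes one global pass over every (column,value) item of every row, deduplicating (column, cleaned value) pairs in a single seen-set while keeping an integer counter of distinct values per column, then selects columns with an early-exit loop that stops at six.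
import Mathlib
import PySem

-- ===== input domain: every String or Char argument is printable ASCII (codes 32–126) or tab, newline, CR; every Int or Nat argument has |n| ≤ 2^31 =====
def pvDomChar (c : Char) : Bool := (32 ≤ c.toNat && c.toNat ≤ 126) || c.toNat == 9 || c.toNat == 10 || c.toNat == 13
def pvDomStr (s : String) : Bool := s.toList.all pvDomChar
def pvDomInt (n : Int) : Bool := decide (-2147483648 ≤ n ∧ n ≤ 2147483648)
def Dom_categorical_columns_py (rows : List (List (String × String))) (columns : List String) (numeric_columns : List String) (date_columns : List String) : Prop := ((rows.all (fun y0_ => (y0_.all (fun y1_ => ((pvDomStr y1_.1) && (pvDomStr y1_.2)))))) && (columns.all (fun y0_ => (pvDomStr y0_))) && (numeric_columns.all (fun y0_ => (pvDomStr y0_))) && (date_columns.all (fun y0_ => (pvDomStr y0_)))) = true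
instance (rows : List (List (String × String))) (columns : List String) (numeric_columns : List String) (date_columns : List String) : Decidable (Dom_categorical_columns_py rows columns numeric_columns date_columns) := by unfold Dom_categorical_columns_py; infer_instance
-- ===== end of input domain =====

-- B replaces A's per-column scans over the rows by one global pass over every (column, value)
-- item of every row, deduplicating (column, cleaned value) pairs in a single seen-set while
-- keeping an integer counter of distinct values per column, plus an early-exit selection loop
-- (objective: alternative).

-- row.get(column): first-match lookup in the association list (Python dict lookup; exact by the
-- task's dict convention: a dict is an association list looked up by first match)
def pvRowGet? (row : List (String × String)) (c : String) : Option String :=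
  (row.find? (fun p => p.1 == c)).map (·.2)

-- ===== PORT A =====
def categorical_columns_py (rows : List (List (String × String))) (columns : List String) (numeric_columns : List String) (date_columns : List String) : List String :=
  let ignored : PySem.Set String := PySem.Set.union (PySem.Set.ofList numeric_columns) date_columns
  let cats := columns.foldl (fun acc column =>
    if PySem.Set.contains ignored column then acc
    else if ["id_", "id ", "url", "email", "telephone", "contact"].any
              (fun token => PySem.Str.isIn token (PySem.Str.lower column)) then acc
    else
      let values := rows.filterMap (fun row =>
        match pvRowGet? row column with
        | none => none
        | some v => if v = "" then none else some (PySem.Str.strip v))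
      let distinct := PySem.Set.ofList (values.filter (fun v => v ≠ ""))
      if 1 < PySem.Set.len distinct ∧ PySem.Set.len distinct ≤ min 20 (max 3 (PySem.List.len rows))
      then acc ++ [column] else acc) []
  cats.take 6

-- ===== PORT B =====
-- B's inner step for one (column, value) item: clean the value; if the (column, cleaned value)
-- pair is new, record it in the seen-set and bump the column's distinct counter
def pvStepB (st : PySem.Set (String × String) × PySem.Dict String Int) (p : String × String) : PySem.Set (String × String) × PySem.Dict String Int :=
  if p.2 = "" then st
  else
    let s := PySem.Str.strip p.2
    if s = "" then st
    else if PySem.Set.contains st.1 (p.1, s) then st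
    else (PySem.Set.add st.1 (p.1, s), st.2.insert p.1 (st.2.getD p.1 0 + 1))

-- B's selection loop: walk columns in order, break as soon as out has six entries
def pvOutLoop (ignored : PySem.Set String) (counts : PySem.Dict String Int) (limit : Int) : List String → List String → List String
  | [], out => out
  | c :: rest, out =>
    if out.length = 6 then out
    else if PySem.Set.contains ignored c then pvOutLoop ignored counts limit rest out
    else if ["id_", "id ", "url", "email", "telephone", "contact"].any
              (fun t => PySem.Str.isIn t (PySem.Str.lower c)) then pvOutLoop ignored counts limit rest out
    else if 1 < counts.getD c 0 ∧ counts.getD c 0 ≤ limit then pvOutLoop ignored counts limit rest (out ++ [c])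
    else pvOutLoop ignored counts limit rest out

def categorical_columns_py_alt (rows : List (List (String × String))) (columns : List String) (numeric_columns : List String) (date_columns : List String) : List String :=
  let st := rows.foldl (fun st row => row.foldl pvStepB st) ((PySem.Set.empty : PySem.Set (String × String)), (PySem.Dict.empty : PySem.Dict String Int))
  let ignored : PySem.Set String := PySem.Set.union (PySem.Set.ofList numeric_columns) date_columns
  let limit : Int := min 20 (max 3 (PySem.List.len rows))
  pvOutLoop ignored st.2 limit columns []

-- ===== PRECONDITION & SPEC =====
-- Pre_ excludes association-list rows carrying a duplicate key, which no Python dict (the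
-- declared type of a row) can represent: A reads the first binding while B's item pass sees both.
def Pre_categorical_columns_py (rows : List (List (String × String))) (columns : List String) (numeric_columns : List String) (date_columns : List String) : Prop :=
  ∀ row ∈ rows, (row.map Prod.fst).Nodup
instance (rows : List (List (String × String))) (columns : List String) (numeric_columns : List String) (date_columns : List String) : Decidable (Pre_categorical_columns_py rows columns numeric_columns date_columns) := by unfold Pre_categorical_columns_py; infer_instance

def pvWitness_categorical_columns_py : (List (List (String × String))) × List String × List String × List String :=
  ([[("a", "x"), ("b", "y")], [("a", "z")]], ["a", "b"], ["b"], [])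

def Spec_categorical_columns_py (rows : List (List (String × String))) (columns : List String) (numeric_columns : List String) (date_columns : List String) (out : List String) : Prop := out = categorical_columns_py_alt rows columns numeric_columns date_columns
instance (rows : List (List (String × String))) (columns : List String) (numeric_columns : List String) (date_columns : List String) (out : List String) : Decidable (Spec_categorical_columns_py rows columns numeric_columns date_columns out) := by unfold Spec_categorical_columns_py; infer_instance

-- ===== CLAIM (what is proved, stated in full; the proofs are below) =====
def Claim_equal_categorical_columns_py : Prop := ∀ (rows : List (List (String × String))) (columns : List String) (numeric_columns : List String) (date_columns : List String), Dom_categorical_columns_py rows columns numeric_columns date_columns → Pre_categorical_columns_py rows columns numeric_columns date_columns → Spec_categorical_columns_py rows columns numeric_columns date_columns (categorical_columns_py rows columns numeric_columns date_columns)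

-- ===== LEMMAS AND PROOFS =====

-- the cleaning of one raw value, as an Option
def pvClean (v : String) : Option String :=
  if v = "" then none else if PySem.Str.strip v = "" then none else some (PySem.Str.strip v)

-- the cleaned values of column c among a stream of (column, value) items
def pvPerCol (c : String) (l : List (String × String)) : List String :=
  l.filterMap (fun p => if p.1 = c then pvClean p.2 else none)

lemma pvPerCol_append (c : String) (l₁ l₂ : List (String × String)) :
    pvPerCol c (l₁ ++ l₂) = pvPerCol c l₁ ++ pvPerCol c l₂ := by
  simp [pvPerCol]

-- invariant of B's global fold, relative to the already-processed stream `pre`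
lemma pvFoldB (l pre : List (String × String)) (st : PySem.Set (String × String) × PySem.Dict String Int)
    (hseen : ∀ c s, (c, s) ∈ st.1 ↔ s ∈ pvPerCol c pre)
    (hcnt : ∀ c, st.2.getD c 0 = PySem.Set.len (PySem.Set.ofList (pvPerCol c pre))) :
    (∀ c s, (c, s) ∈ (l.foldl pvStepB st).1 ↔ s ∈ pvPerCol c (pre ++ l)) ∧
    (∀ c, (l.foldl pvStepB st).2.getD c 0 = PySem.Set.len (PySem.Set.ofList (pvPerCol c (pre ++ l)))) := by
  induction l generalizing pre st with
  | nil => simpa using ⟨hseen, hcnt⟩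
  | cons p l ih =>
    rw [List.foldl_cons]
    have hstep : ∀ c, pvPerCol c (pre ++ [p]) = pvPerCol c pre ++ (if p.1 = c then (pvClean p.2).toList else []) := by
      intro c; rw [pvPerCol_append]; congr 1
      unfold pvPerCol
      cases h : pvClean p.2 <;> by_cases hc : p.1 = c <;> simp [hc, h]
    have key : (∀ c s, (c, s) ∈ (pvStepB st p).1 ↔ s ∈ pvPerCol c (pre ++ [p])) ∧
        (∀ c, (pvStepB st p).2.getD c 0 = PySem.Set.len (PySem.Set.ofList (pvPerCol c (pre ++ [p])))) := by
      by_cases h1 : p.2 = ""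
      · have hst : pvStepB st p = st := by simp [pvStepB, h1]
        have hcl : pvClean p.2 = none := by simp [pvClean, h1]
        constructor
        · intro c s; rw [hst, hstep c, hcl]; simp [hseen c s]
        · intro c; rw [hst, hstep c, hcl]; simp [hcnt c]
      · by_cases h2 : PySem.Str.strip p.2 = ""
        · have hst : pvStepB st p = st := by simp [pvStepB, h1, h2]
          have hcl : pvClean p.2 = none := by simp [pvClean, h1, h2]
          constructor
          · intro c s; rw [hst, hstep c, hcl]; simp [hseen c s]
          · intro c; rw [hst, hstep c, hcl]; simp [hcnt c]
        · have hclean : pvClean p.2 = some (PySem.Str.strip p.2) := by simp [pvClean, h1, h2]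
          by_cases hm : (p.1, PySem.Str.strip p.2) ∈ st.1
          · have hst : pvStepB st p = st := by
              simp [pvStepB, h1, h2, hm]
            have hmem' : PySem.Str.strip p.2 ∈ pvPerCol p.1 pre := (hseen _ _).mp hm
            constructor
            · intro c s
              rw [hst, hstep c]
              by_cases hc : p.1 = c
              · subst hc
                rw [hclean, if_pos rfl]
                simp only [Option.toList_some, List.mem_append, List.mem_singleton]
                constructor
                · intro h; exact Or.inl ((hseen _ _).mp h)
                · rintro (h | rfl)
                  · exact (hseen _ _).mpr h
                  · exact hm
              · rw [if_neg hc]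
                simp [hseen c s]
            · intro c
              rw [hst, hstep c]
              by_cases hc : p.1 = c
              · subst hc
                rw [hclean, if_pos rfl]
                simp only [Option.toList_some]
                rw [hcnt p.1, PySem.Set.ofList_append_singleton,
                    PySem.Set.add_of_mem ((PySem.Set.mem_ofList _ _).mpr hmem')]
              · rw [if_neg hc]
                simp [hcnt c]
          · have hst : pvStepB st p = (PySem.Set.add st.1 (p.1, PySem.Str.strip p.2), st.2.insert p.1 (st.2.getD p.1 0 + 1)) := by
              simp [pvStepB, h1, h2, hm]
            have hnmem' : PySem.Str.strip p.2 ∉ pvPerCol p.1 pre := fun h => hm ((hseen _ _).mpr h)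
            constructor
            · intro c s
              rw [hst, hstep c]
              by_cases hc : p.1 = c
              · subst hc
                rw [hclean, if_pos rfl]
                simp only [Option.toList_some]
                rw [PySem.Set.mem_add]
                simp only [List.mem_append, List.mem_singleton, Prod.mk.injEq]
                constructor
                · rintro (h | ⟨-, rfl⟩)
                  · exact Or.inl ((hseen _ _).mp h)
                  · exact Or.inr rfl
                · rintro (h | rfl)
                  · exact Or.inl ((hseen _ _).mpr h)
                  · exact Or.inr ⟨trivial, rfl⟩
              · rw [if_neg hc, PySem.Set.mem_add]
                simp only [List.append_nil, Prod.mk.injEq]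
                constructor
                · rintro (h | ⟨rfl, -⟩)
                  · exact (hseen _ _).mp h
                  · exact absurd rfl hc
                · intro h; exact Or.inl ((hseen _ _).mpr h)
            · intro c
              rw [hst, hstep c]
              by_cases hc : p.1 = c
              · subst hc
                rw [hclean, if_pos rfl]
                simp only [Option.toList_some]
                rw [PySem.Dict.getD_insert, if_pos rfl, hcnt p.1, PySem.Set.ofList_append_singleton,
                    PySem.Set.add_of_not_mem (fun h => hnmem' ((PySem.Set.mem_ofList _ _).mp h))]
                simp [PySem.Set.len]
              · rw [if_neg hc, PySem.Dict.getD_insert, if_neg (fun h => hc h.symm), hcnt c]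
                simp
    have := ih (pre ++ [p]) (pvStepB st p) key.1 key.2
    simpa using this
  
-- B's row-major double fold is the fold over the flattened item stream
lemma pvFoldB_flat (rows : List (List (String × String))) (st : PySem.Set (String × String) × PySem.Dict String Int) :
    rows.foldl (fun st row => row.foldl pvStepB st) st = (rows.flatMap id).foldl pvStepB st := by
  induction rows generalizing st with
  | nil => rfl
  | cons row rows ih => rw [List.foldl_cons, List.flatMap_cons, List.foldl_append]; exact ih _

-- per-row cleaned values of c: with unique keys the item stream agrees with dict lookup
lemma pvPerCol_eq_nil (c : String) (row : List (String × String)) (h : c ∉ row.map Prod.fst) :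
    pvPerCol c row = [] := by
  induction row with
  | nil => rfl
  | cons p row ih =>
    simp only [List.map_cons, List.mem_cons, not_or] at h
    have hne : ¬ p.1 = c := fun hc => h.1 hc.symm
    simp only [pvPerCol, List.filterMap_cons, if_neg hne]
    exact ih h.2

lemma pvPerCol_row (c : String) (row : List (String × String)) (hnd : (row.map Prod.fst).Nodup) :
    pvPerCol c row = ((pvRowGet? row c).bind pvClean).toList := by
  induction row with
  | nil => rfl
  | cons p row ih =>
    simp only [List.map_cons, List.nodup_cons] at hnd
    by_cases hc : p.1 = c
    · subst hc
      have hz : pvPerCol p.1 row = [] := pvPerCol_eq_nil _ _ hnd.1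
      unfold pvPerCol at hz ⊢
      unfold pvRowGet?
      cases hcl : pvClean p.2 <;> simp [hcl, hz]
    · have hbeq : (p.1 == c) = false := by simp [hc]
      simp only [pvPerCol, List.filterMap_cons, if_neg hc, pvRowGet?, List.find?_cons, hbeq]
      exact ih hnd.2

-- A's cleaned, nonempty value list for column c equals the flattened per-column stream
lemma pvValsA (rows : List (List (String × String))) (c : String)
    (hnd : ∀ row ∈ rows, (row.map Prod.fst).Nodup) :
    (rows.filterMap (fun row =>
        match pvRowGet? row c with
        | none => none
        | some v => if v = "" then none else some (PySem.Str.strip v))).filter (fun v => v ≠ "")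
      = pvPerCol c (rows.flatMap id) := by
  induction rows with
  | nil => rfl
  | cons row rows ih =>
    have hrow := pvPerCol_row c row (hnd row (List.mem_cons_self))
    rw [List.flatMap_cons, pvPerCol_append, ← ih (fun r hr => hnd r (List.mem_cons_of_mem _ hr))]
    simp only [id, List.filterMap_cons]
    cases hg : pvRowGet? row c with
    | none => simp [hrow, hg]
    | some v =>
      by_cases hv : v = ""
      · simp [hrow, hg, hv, pvClean]
      · by_cases hs : PySem.Str.strip v = ""
        · simp [hrow, hg, hv, hs, pvClean]
        · simp [hrow, hg, hv, hs, pvClean]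

-- B's counter at any column c is the size of A's distinct set for c
lemma pvCounts (rows : List (List (String × String))) (c : String)
    (hnd : ∀ row ∈ rows, (row.map Prod.fst).Nodup) :
    (rows.foldl (fun st row => row.foldl pvStepB st)
        ((PySem.Set.empty : PySem.Set (String × String)), (PySem.Dict.empty : PySem.Dict String Int))).2.getD c 0
      = PySem.Set.len (PySem.Set.ofList ((rows.filterMap (fun row =>
          match pvRowGet? row c with
          | none => none
          | some v => if v = "" then none else some (PySem.Str.strip v))).filter (fun v => v ≠ ""))) := by
  rw [pvFoldB_flat, pvValsA rows c hnd]
  have h := pvFoldB (rows.flatMap id) []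
      ((PySem.Set.empty : PySem.Set (String × String)), (PySem.Dict.empty : PySem.Dict String Int))
      (by intro c s; simp [PySem.Set.empty, pvPerCol])
      (by intro c; simp [pvPerCol, PySem.Set.len, PySem.Set.ofList])
  simpa using h.2 c

-- the selection predicate shared by both final loops
def pvQ (ignored : PySem.Set String) (n : String → Int) (limit : Int) (c : String) : Bool :=
  !(PySem.Set.contains ignored c) &&
  !(["id_", "id ", "url", "email", "telephone", "contact"].any
      (fun t => PySem.Str.isIn t (PySem.Str.lower c))) &&
  decide (1 < n c ∧ n c ≤ limit)

-- B's early-exit loop is filter-then-take-six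
lemma pvOutLoop_eq (ignored : PySem.Set String) (counts : PySem.Dict String Int) (limit : Int)
    (l out : List String) (h : out.length ≤ 6) :
    pvOutLoop ignored counts limit l out
      = (out ++ l.filter (pvQ ignored (fun c => counts.getD c 0) limit)).take 6 := by
  induction l generalizing out with
  | nil =>
    simp [pvOutLoop, List.take_of_length_le h]
  | cons c l ih =>
    unfold pvOutLoop
    by_cases h6 : out.length = 6
    · rw [if_pos h6, List.take_left' h6]
    · rw [if_neg h6]
      cases hi : PySem.Set.contains ignored c with
      | true =>
        have hq : pvQ ignored (fun c => counts.getD c 0) limit c = false := by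
          unfold pvQ; rw [hi]; rfl
        rw [ih out h, List.filter_cons, hq]
        simp
      | false =>
        cases ht : (["id_", "id ", "url", "email", "telephone", "contact"].any
            (fun t => PySem.Str.isIn t (PySem.Str.lower c))) with
        | true =>
          have hq : pvQ ignored (fun c => counts.getD c 0) limit c = false := by
            unfold pvQ; rw [hi, ht]; rfl
          rw [ih out h, List.filter_cons, hq]
          simp
        | false =>
          by_cases hqp : 1 < counts.getD c 0 ∧ counts.getD c 0 ≤ limit
          · have hq : pvQ ignored (fun c => counts.getD c 0) limit c = true := by
              unfold pvQ; rw [hi, ht]; simp [hqp]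
            rw [ih (out ++ [c]) (by simp; omega), ih out h, List.filter_cons, hq]
            simp [hqp]
          · have hq : pvQ ignored (fun c => counts.getD c 0) limit c = false := by
              unfold pvQ; rw [hi, ht]; simp [hqp]
            rw [ih out h, List.filter_cons, hq]
            simp [hqp]

-- A's fold is filter (same predicate, A's distinct-set sizes)
lemma pvFoldA_eq (rows : List (List (String × String))) (columns : List String)
    (ignored : PySem.Set String) (limit : Int) (n : String → Int)
    (hn : ∀ c, n c = PySem.Set.len (PySem.Set.ofList ((rows.filterMap (fun row =>
        match pvRowGet? row c with
        | none => none
        | some v => if v = "" then none else some (PySem.Str.strip v))).filter (fun v => v ≠ "")))) :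
    columns.foldl (fun acc column =>
      if PySem.Set.contains ignored column then acc
      else if ["id_", "id ", "url", "email", "telephone", "contact"].any
                (fun token => PySem.Str.isIn token (PySem.Str.lower column)) then acc
      else
        let values := rows.filterMap (fun row =>
          match pvRowGet? row column with
          | none => none
          | some v => if v = "" then none else some (PySem.Str.strip v))
        let distinct := PySem.Set.ofList (values.filter (fun v => v ≠ ""))
        if 1 < PySem.Set.len distinct ∧ PySem.Set.len distinct ≤ limit
        then acc ++ [column] else acc) []
      = columns.filter (pvQ ignored n limit) := by
  induction columns using List.reverseRecOn with
  | nil => rfl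
  | append_singleton columns c ih =>
    rw [List.foldl_append, List.foldl_cons, List.foldl_nil, ih, List.filter_append,
        List.filter_singleton]
    cases hi : PySem.Set.contains ignored c with
    | true =>
      have hq : pvQ ignored n limit c = false := by
        unfold pvQ; rw [hi]; rfl
      rw [hq]
      simp
    | false =>
      cases ht : (["id_", "id ", "url", "email", "telephone", "contact"].any
          (fun t => PySem.Str.isIn t (PySem.Str.lower c))) with
      | true =>
        have hq : pvQ ignored n limit c = false := by
          unfold pvQ; rw [hi, ht]; rfl
        rw [hq]
        simp
      | false =>
        simp only [Bool.false_eq_true, if_false]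
        split_ifs with hqp
        · have hq : pvQ ignored n limit c = true := by
            unfold pvQ; rw [hi, ht, hn c]
            simp only [Bool.not_false, Bool.true_and]
            exact decide_eq_true hqp
          rw [hq]
          simp
        · have hq : pvQ ignored n limit c = false := by
            unfold pvQ; rw [hi, ht, hn c]
            simp only [Bool.not_false, Bool.true_and]
            exact decide_eq_false hqp
          rw [hq]
          simp

-- ===== VERDICT (by name: the statement is the Claim_ definition above) =====
theorem categorical_columns_py_spec : Claim_equal_categorical_columns_py := by
  intro rows columns numeric_columns date_columns _ hpre
  unfold Spec_categorical_columns_py categorical_columns_py categorical_columns_py_alt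
  simp only []
  rw [pvOutLoop_eq _ _ _ _ [] (by simp), List.nil_append,
      pvFoldA_eq rows columns _ _ (fun c =>
        (rows.foldl (fun st row => row.foldl pvStepB st)
          ((PySem.Set.empty : PySem.Set (String × String)), (PySem.Dict.empty : PySem.Dict String Int))).2.getD c 0)
        (fun c => pvCounts rows c hpre)]
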